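-- pv_equiv track=rewrite | github.com/Rangeeshar/geektrustchallenge | ally.py | process_ally
-- ===== SOURCE A (Python) =====
-- def process_ally(pattern, message):
--     '''
--     Process the message from kingdom and\
--             returns True if emblem in it else false
--     :params:
--         pattern:
--             type: string
--         txt:
--             type: string
--     :response:
--         True/False
--     '''
--     m1 = sorted(pattern)
--     m2 = sorted(message)
--     if len(pattern) >= 1 and len(message) >= 1:
--         for alpha in m2:
--             try:
--                 m1.remove(alpha)
--             except:
--                 return False
--         return True
--     return False
-- ===== SOURCE B (Python) =====
-- def process_ally(pattern, message):
--     if len(pattern) >= 1 and len(message) >= 1: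
--         counts = {}
--         for c in pattern:
--             counts[c] = counts.get(c, 0) + 1
--         for c in message:
--             if counts.get(c, 0) == 0:
--                 return False
--             counts[c] = counts[c] - 1
--         return True
--     return False
-- ===== Notes on version B (the rewrite author's own statement) =====
-- stated objective: faster
-- what changed: Replaces sorting both strings and repeated list.remove (quadratic) with a single frequency dictionary of the pattern that is decremented in one pass over the message.
import Mathlib
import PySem

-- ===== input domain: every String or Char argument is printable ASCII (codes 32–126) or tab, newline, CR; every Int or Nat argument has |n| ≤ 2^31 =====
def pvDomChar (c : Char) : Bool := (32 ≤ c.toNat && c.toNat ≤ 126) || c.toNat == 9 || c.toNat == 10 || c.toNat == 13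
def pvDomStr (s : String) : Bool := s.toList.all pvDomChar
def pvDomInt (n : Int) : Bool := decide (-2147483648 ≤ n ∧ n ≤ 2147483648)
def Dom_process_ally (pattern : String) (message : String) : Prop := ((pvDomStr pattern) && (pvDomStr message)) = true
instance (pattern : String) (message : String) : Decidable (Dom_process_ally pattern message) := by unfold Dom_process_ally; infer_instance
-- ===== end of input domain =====

-- B replaces A's sort-both-strings + list.remove scan (quadratic) by one pattern
-- frequency dictionary decremented in a single pass over the message (linear-ish).

-- ===== PORT A =====
-- the 'for alpha in m2: try m1.remove(alpha) except: return False' loop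
def allyRemoveLoop (m2 : List Char) (m1 : List Char) : Bool :=
  match m2 with
  | [] => true
  | alpha :: rest =>
    match PySem.List.remove? m1 alpha with
    | none => false
    | some m1' => allyRemoveLoop rest m1'

def process_ally (pattern : String) (message : String) : Bool :=
  let m1 := PySem.List.sorted pattern.toList (fun x => x) false
  let m2 := PySem.List.sorted message.toList (fun x => x) false
  if decide (1 ≤ PySem.Str.len pattern) && decide (1 ≤ PySem.Str.len message) then
    allyRemoveLoop m2 m1
  else false

-- ===== PORT B =====
-- the 'for c in message: if counts.get(c,0)==0: return False; counts[c] -= 1' loop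
def allyCountLoop (ms : List Char) (counts : PySem.Dict Char Int) : Bool :=
  match ms with
  | [] => true
  | c :: rest =>
    if counts.getD c 0 == 0 then false
    else allyCountLoop rest (counts.insert c (counts.getD c 0 - 1))

def process_ally_alt (pattern : String) (message : String) : Bool :=
  if decide (1 ≤ PySem.Str.len pattern) && decide (1 ≤ PySem.Str.len message) then
    let counts := pattern.toList.foldl (fun d c => d.insert c (d.getD c 0 + 1)) PySem.Dict.empty
    allyCountLoop message.toList counts
  else false

-- ===== PRECONDITION & SPEC =====
def Spec_process_ally (pattern : String) (message : String) (out : Bool) : Prop := out = process_ally_alt pattern message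
instance (pattern : String) (message : String) (out : Bool) : Decidable (Spec_process_ally pattern message out) := by unfold Spec_process_ally; infer_instance

-- ===== CLAIM (what is proved, stated in full; the proofs are below) =====
def Claim_equal_process_ally : Prop := ∀ (pattern : String) (message : String), Dom_process_ally pattern message → Spec_process_ally pattern message (process_ally pattern message)

-- ===== LEMMAS AND PROOFS =====

-- A's loop returns true iff the multiset of m2 is contained in the multiset of m1.
theorem allyRemoveLoop_iff (m2 : List Char) : ∀ (m1 : List Char),
    allyRemoveLoop m2 m1 = true ↔ ∀ c, m2.count c ≤ m1.count c := by
  induction m2 with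
  | nil => intro m1; simp [allyRemoveLoop]
  | cons a rest ih =>
    intro m1
    by_cases hmem : a ∈ m1
    · rw [allyRemoveLoop, PySem.List.remove?_eq_some_erase m1 a hmem]
      simp only [ih]
      have hone : 1 ≤ m1.count a := List.one_le_count_iff.mpr hmem
      constructor
      · intro h c
        have hc := h c
        rw [List.count_erase] at hc
        by_cases hca : c = a
        · subst hca
          simp [List.count_cons] at hc ⊢ <;> omega
        · simp [List.count_cons, hca, Ne.symm hca] at hc ⊢ <;> omega
      · intro h c
        have hc := h c
        rw [List.count_erase]
        by_cases hca : c = a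
        · subst hca
          simp [List.count_cons] at hc ⊢ <;> omega
        · simp [List.count_cons, hca, Ne.symm hca] at hc ⊢ <;> omega
    · rw [allyRemoveLoop, (PySem.List.remove?_eq_none_iff m1 a).mpr hmem]
      simp only [Bool.false_eq_true, false_iff, not_forall, not_le]
      refine ⟨a, ?_⟩
      have h0 : m1.count a = 0 := List.count_eq_zero_of_not_mem hmem
      simp [List.count_cons, h0] <;> omega

-- B's loop, run with a dict holding exactly the counts of pool, returns true iff
-- the multiset of ms is contained in the multiset of pool.
theorem allyCountLoop_iff (ms : List Char) : ∀ (d : PySem.Dict Char Int) (pool : List Char),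
    (∀ c, d.getD c 0 = (pool.count c : Int)) →
    (allyCountLoop ms d = true ↔ ∀ c, ms.count c ≤ pool.count c) := by
  induction ms with
  | nil => intro d pool _; simp [allyCountLoop]
  | cons c rest ih =>
    intro d pool hd
    rw [allyCountLoop]
    by_cases hz : d.getD c 0 = 0
    · have hcnt : pool.count c = 0 := by have := hd c; omega
      simp only [hz, BEq.rfl, if_true, Bool.false_eq_true, false_iff, not_forall, not_le]
      refine ⟨c, ?_⟩
      rw [hcnt]
      simp [List.count_cons]
    · have hcnt : 1 ≤ pool.count c := by have := hd c; omega
      have hmem : c ∈ pool := List.one_le_count_iff.mp hcnt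
      have hne : (d.getD c 0 == 0) = false := by simpa using hz
      rw [hne, if_neg (by simp)]
      have hinv : ∀ x, (d.insert c (d.getD c 0 - 1)).getD x 0 = ((pool.erase c).count x : Int) := by
        intro x
        rw [PySem.Dict.getD_insert, List.count_erase]
        by_cases hxc : x = c
        · subst hxc
          have := hd x
          simp only [if_pos rfl, BEq.rfl, if_true]
          omega
        · have hb : (c == x) = false := beq_eq_false_iff_ne.mpr (fun h => hxc h.symm)
          rw [if_neg hxc, hd x]
          simp [hb]
      rw [ih _ _ hinv]
      constructor
      · intro h x
        have hx := h x
        rw [List.count_erase] at hx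
        by_cases hxc : c = x
        · subst hxc
          simp [List.count_cons] at hx ⊢ <;> omega
        · simp [List.count_cons, hxc, Ne.symm hxc] at hx ⊢ <;> omega
      · intro h x
        have hx := h x
        rw [List.count_erase]
        by_cases hxc : c = x
        · subst hxc
          simp [List.count_cons] at hx ⊢ <;> omega
        · simp [List.count_cons, hxc, Ne.symm hxc] at hx ⊢ <;> omega

theorem process_ally_spec : Claim_equal_process_ally := by
  intro pattern message _
  unfold Spec_process_ally process_ally process_ally_alt
  by_cases hguard : (decide (1 ≤ PySem.Str.len pattern) && decide (1 ≤ PySem.Str.len message)) = true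
  · simp only [hguard, if_true]
    have hA := allyRemoveLoop_iff (PySem.List.sorted message.toList (fun x => x) false)
      (PySem.List.sorted pattern.toList (fun x => x) false)
    have hB := allyCountLoop_iff message.toList
      (pattern.toList.foldl (fun d c => d.insert c (d.getD c 0 + 1)) PySem.Dict.empty)
      pattern.toList
      (by intro c
          simpa using PySem.Dict.getD_foldl_insert_add_one pattern.toList PySem.Dict.empty c)
    rw [Bool.eq_iff_iff, hA, hB]
    have hpm : ∀ c, (PySem.List.sorted message.toList (fun x => x) false).count c
        = message.toList.count c := fun c =>
      (PySem.List.sorted_perm message.toList (fun x => x) false).count_eq c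
    have hpp : ∀ c, (PySem.List.sorted pattern.toList (fun x => x) false).count c
        = pattern.toList.count c := fun c =>
      (PySem.List.sorted_perm pattern.toList (fun x => x) false).count_eq c
    constructor
    · intro h c; have := h c; rw [hpm c, hpp c] at this; exact this
    · intro h c; rw [hpm c, hpp c]; exact h c
  · simp only [Bool.not_eq_true] at hguard
    rw [hguard]
    simp
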